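-- pv_equiv track=rewrite | github.com/Fondamenti18/fondamenti-di-programmazione | students/1821702/homework02/program03.py | pulizia
-- ===== SOURCE A (Python) =====
-- def pulizia(parola):
--     c = ''
--     for i in parola:
--         if i.isalpha():
--             c += i
--         else:
--             return c
--     return c
-- ===== SOURCE B (Python) =====
-- def pulizia(parola):
--     for i, ch in enumerate(parola):
--         if not ch.isalpha():
--             return parola[:i]
--     return parola
-- ===== Notes on version B (the rewrite author's own statement) =====
-- stated objective: simpler
-- what changed: Instead of accumulating alphabetic characters into a growing string, B scans for the first non-alphabetic position and returns the prefix with a single slice (or the whole string if none).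
import Mathlib
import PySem

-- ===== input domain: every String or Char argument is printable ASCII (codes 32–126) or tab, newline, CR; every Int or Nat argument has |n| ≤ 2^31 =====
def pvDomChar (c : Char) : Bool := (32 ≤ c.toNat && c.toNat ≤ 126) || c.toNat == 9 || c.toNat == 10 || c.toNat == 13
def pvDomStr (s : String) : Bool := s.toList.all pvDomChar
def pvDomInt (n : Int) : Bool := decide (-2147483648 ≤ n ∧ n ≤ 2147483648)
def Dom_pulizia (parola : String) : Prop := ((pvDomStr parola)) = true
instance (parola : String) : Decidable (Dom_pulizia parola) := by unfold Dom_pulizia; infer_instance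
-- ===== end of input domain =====

-- B replaces A's incremental string accumulation by finding the first non-alphabetic
-- index and returning a single prefix slice (objective: simpler).

-- ===== PORT A =====
-- A's loop: accumulate alphabetic chars, early return on the first non-alphabetic one.
-- (the accumulator is kept as List Char; String.ofList at the end — exact for `c += i`)
def puliziaLoopA : List Char → List Char → List Char
  | [], c => c
  | i :: rest, c => if PySem.Chars.isalpha i then puliziaLoopA rest (c ++ [i]) else c

def pulizia (parola : String) : String := String.ofList (puliziaLoopA parola.toList [])

-- ===== PORT B =====
-- index of the first char failing isalpha (B's enumerate loop)
def firstNonAlpha : List Char → Nat → Option Nat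
  | [], _ => none
  | ch :: rest, i => if !PySem.Chars.isalpha ch then some i else firstNonAlpha rest (i + 1)

def pulizia_alt (parola : String) : String :=
  match firstNonAlpha parola.toList 0 with
  | some i => String.ofList (parola.toList.take i)  -- parola[:i], exact since 0 ≤ i ≤ len
  | none => parola

-- ===== PRECONDITION & SPEC =====
def Spec_pulizia (parola : String) (out : String) : Prop := out = pulizia_alt parola
instance (parola : String) (out : String) : Decidable (Spec_pulizia parola out) := by unfold Spec_pulizia; infer_instance

-- ===== CLAIM (what is proved, stated in full; the proofs are below) =====
def Claim_equal_pulizia : Prop := ∀ (parola : String), Dom_pulizia parola → Spec_pulizia parola (pulizia parola)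

-- ===== LEMMAS AND PROOFS =====
theorem firstNonAlpha_shift (cs : List Char) (i : Nat) :
    firstNonAlpha cs (i + 1) = (firstNonAlpha cs i).map (· + 1) := by
  induction cs generalizing i with
  | nil => simp [firstNonAlpha]
  | cons ch rest ih =>
    simp only [firstNonAlpha]
    by_cases h : PySem.Chars.isalpha ch
    · simp [h, ih]
    · simp [h]

theorem puliziaLoopA_eq (cs : List Char) : ∀ acc : List Char,
    puliziaLoopA cs acc = acc ++ (match firstNonAlpha cs 0 with
      | some i => cs.take i
      | none => cs) := by
  induction cs with
  | nil => intro acc; simp [puliziaLoopA, firstNonAlpha]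
  | cons ch rest ih =>
    intro acc
    simp only [puliziaLoopA, firstNonAlpha]
    by_cases h : PySem.Chars.isalpha ch
    · simp only [h, Bool.not_true, if_true, Bool.false_eq_true, if_false]
      rw [ih, firstNonAlpha_shift]
      cases hf : firstNonAlpha rest 0 with
      | none => simp [List.append_assoc]
      | some i => simp [List.take_succ_cons, List.append_assoc]
    · simp [h]

-- ===== VERDICT (by name: the statement is the Claim_ definition above) =====
theorem pulizia_spec : Claim_equal_pulizia := by
  intro parola _
  unfold Spec_pulizia pulizia pulizia_alt
  rw [puliziaLoopA_eq]
  cases hf : firstNonAlpha parola.toList 0 with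
  | none => simp [String.ofList_toList]
  | some i => simp
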